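-- pv_equiv track=rewrite | github.com/nologicexe/test | blink-detection/functions.py | parseBlinks
-- ===== SOURCE A (Python) =====
-- def parseBlinks(list, min, max):
--     if (len(list) == 0):
--         return list
--     else:
--         start = -1
--         end = -1
--         for i in range(len(list)):
--             if (list[i] < min):
--                 start = i
--             if (list[i] <= max):
--                 end = i
--         start += 1
--         if (end == -1):
--             return []
--         end += 1
--         return list[start:end]
-- ===== SOURCE B (Python) =====
-- def parseBlinks(list, min, max):
--     if len(list) == 0:
--         return list
--     # find the last index whose element is <= max, scanning backwards
--     end = None
--     for i in range(len(list) - 1, -1, -1):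
--         if list[i] <= max:
--             end = i
--             break
--     if end is None:
--         return []
--     # find the last index whose element is < min, scanning backwards
--     start = -1
--     for i in range(len(list) - 1, -1, -1):
--         if list[i] < min:
--             start = i
--             break
--     return list[start + 1:end + 1]
-- ===== Notes on version B (the rewrite author's own statement) =====
-- stated objective: alternative
-- what changed: Replaces A's single forward pass that accumulates the last matching index for both thresholds with two independent backward index searches that stop at the first hit (last <= max index, then last < min index), then slices.
import Mathlib
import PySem

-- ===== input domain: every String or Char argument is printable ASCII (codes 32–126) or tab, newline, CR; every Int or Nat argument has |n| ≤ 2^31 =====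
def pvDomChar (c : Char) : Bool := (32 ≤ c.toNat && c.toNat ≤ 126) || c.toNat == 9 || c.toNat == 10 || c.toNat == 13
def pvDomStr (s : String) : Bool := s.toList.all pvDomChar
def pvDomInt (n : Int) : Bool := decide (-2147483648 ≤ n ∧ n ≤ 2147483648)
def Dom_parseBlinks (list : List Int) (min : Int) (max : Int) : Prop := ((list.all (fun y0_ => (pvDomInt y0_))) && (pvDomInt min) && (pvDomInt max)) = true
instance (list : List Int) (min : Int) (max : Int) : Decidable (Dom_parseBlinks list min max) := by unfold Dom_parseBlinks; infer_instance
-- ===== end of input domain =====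

-- B replaces A's single forward accumulating pass with two independent backward
-- searches that stop at the first hit (objective: alternative decomposition; same asymptotic cost).

-- ===== PORT A =====
def parseBlinks (list : List Int) (min : Int) (max : Int) : List Int :=
  if list.length == 0 then list
  else
    let st :=
      (PySem.List.pyRange 0 (list.length : Int) 1).foldl
        (fun (s : Int × Int) i =>
          let s1 := if PySem.List.pyGetD list i 0 < min then (i, s.2) else s
          if PySem.List.pyGetD list i 0 ≤ max then (s1.1, i) else s1)
        (-1, -1)
    let start := st.1 + 1
    if st.2 == -1 then []
    else PySem.List.slice list (some start) (some (st.2 + 1))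

-- ===== PORT B =====
-- 'for i in range(len(xs)-1, -1, -1): if p(xs[i]): found i; break' as a structural
-- countdown recursion (k+1 visits index k first, exactly the backward loop with break).
def searchBack (xs : List Int) (p : Int → Bool) : Nat → Option Int
  | 0 => none
  | k + 1 => if p (PySem.List.pyGetD xs (k : Int) 0) then some (k : Int) else searchBack xs p k

def parseBlinks_alt (list : List Int) (min : Int) (max : Int) : List Int :=
  if list.length == 0 then list
  else
    match searchBack list (fun x => decide (x ≤ max)) list.length with
    | none => []
    | some e =>
      let start := (searchBack list (fun x => decide (x < min)) list.length).getD (-1)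
      PySem.List.slice list (some (start + 1)) (some (e + 1))

-- ===== PRECONDITION & SPEC =====
def Spec_parseBlinks (list : List Int) (min : Int) (max : Int) (out : List Int) : Prop := out = parseBlinks_alt list min max
instance (list : List Int) (min : Int) (max : Int) (out : List Int) : Decidable (Spec_parseBlinks list min max out) := by unfold Spec_parseBlinks; infer_instance

-- ===== CLAIM (what is proved, stated in full; the proofs are below) =====
def Claim_equal_parseBlinks : Prop := ∀ (list : List Int) (min : Int) (max : Int), Dom_parseBlinks list min max → Spec_parseBlinks list min max (parseBlinks list min max)

-- ===== LEMMAS AND PROOFS =====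

-- Any index found by searchBack is nonnegative.
theorem searchBack_nonneg (xs : List Int) (p : Int → Bool) :
    ∀ (k : Nat) (i : Int), searchBack xs p k = some i → 0 ≤ i := by
  intro k
  induction k with
  | zero => intro i h; simp [searchBack] at h
  | succ k ih =>
      intro i h
      simp only [searchBack] at h
      split at h
      · simp only [Option.some.injEq] at h
        omega
      · exact ih i h

-- A's forward fold over range(k) computes exactly the two backward first-hit searches.
theorem fold_eq_search (xs : List Int) (min max : Int) :
    ∀ (k : Nat),
      (PySem.List.pyRange 0 (k : Int) 1).foldl
        (fun (s : Int × Int) i =>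
          let s1 := if PySem.List.pyGetD xs i 0 < min then (i, s.2) else s
          if PySem.List.pyGetD xs i 0 ≤ max then (s1.1, i) else s1)
        (-1, -1)
      = ((searchBack xs (fun x => decide (x < min)) k).getD (-1),
         (searchBack xs (fun x => decide (x ≤ max)) k).getD (-1)) := by
  intro k
  induction k with
  | zero => simp [PySem.List.pyRange, searchBack]
  | succ k ih =>
      have hcast : ((k + 1 : Nat) : Int) = (k : Int) + 1 := by push_cast; ring
      rw [hcast, PySem.List.pyRange_one_succ_right (by positivity), List.foldl_append, ih]
      simp only [List.foldl_cons, List.foldl_nil, searchBack]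
      simp only [PySem.List.pyGetD_natCast]
      by_cases h1 : xs[k]?.getD 0 < min <;> by_cases h2 : xs[k]?.getD 0 ≤ max <;>
        simp [h1, h2]

-- ===== VERDICT (by name: the statement is the Claim_ definition above) =====
theorem parseBlinks_spec : Claim_equal_parseBlinks := by
  intro list min max _
  show parseBlinks list min max = parseBlinks_alt list min max
  unfold parseBlinks parseBlinks_alt
  by_cases hlen : list.length = 0
  · simp [hlen]
  · simp only [hlen, beq_iff_eq, if_false]
    rw [fold_eq_search list min max list.length]
    cases hE : searchBack list (fun x => decide (x ≤ max)) list.length with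
    | none => simp
    | some e =>
        have he : (0:Int) ≤ e := searchBack_nonneg _ _ _ _ hE
        simp only [Option.getD_some]
        have hne : ¬ (e = -1) := by omega
        simp [hne]
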